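-- pv_equiv track=rewrite | github.com/Triaphlax/Kattis | Python/MoneyMatters.py | dfs_friends_iterative
-- ===== SOURCE A (Python) =====
-- def dfs_friends_iterative(graph, start):
--     stack = [start]
--     path = set()
--     sum = 0
--
--     while stack:
--         node = stack.pop()
--         if node in path:
--             continue
--         path.add(node)
--         sum += graph[node][0]
--         for neighbor in graph[node][1]:
--             stack.append(neighbor)
--
--     return (path, sum)
-- ===== SOURCE B (Python) =====
-- def dfs_friends_iterative(graph, start):
--     # Recursive DFS: visit a node, then recurse on its neighbors in reverse
--     # order (matching the pop order of a flat stack), sharing one visited set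
--     # and returning each call's value sum up the call chain.
--     path = set()
--
--     def dfs(node):
--         if node in path:
--             return 0
--         path.add(node)
--         value, neighbors = graph[node]
--         total = value
--         for nb in reversed(neighbors):
--             total += dfs(nb)
--         return total
--
--     return (path, dfs(start))
-- ===== Notes on version B (the rewrite author's own statement) =====
-- stated objective: alternative
-- what changed: B replaces A's explicit flat stack loop with a recursive DFS (a helper returning each subtree's value sum, sharing the visited set, recursing on neighbors in reverse order), so the visit order and therefore the set and sum are identical.
import Mathlib
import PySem

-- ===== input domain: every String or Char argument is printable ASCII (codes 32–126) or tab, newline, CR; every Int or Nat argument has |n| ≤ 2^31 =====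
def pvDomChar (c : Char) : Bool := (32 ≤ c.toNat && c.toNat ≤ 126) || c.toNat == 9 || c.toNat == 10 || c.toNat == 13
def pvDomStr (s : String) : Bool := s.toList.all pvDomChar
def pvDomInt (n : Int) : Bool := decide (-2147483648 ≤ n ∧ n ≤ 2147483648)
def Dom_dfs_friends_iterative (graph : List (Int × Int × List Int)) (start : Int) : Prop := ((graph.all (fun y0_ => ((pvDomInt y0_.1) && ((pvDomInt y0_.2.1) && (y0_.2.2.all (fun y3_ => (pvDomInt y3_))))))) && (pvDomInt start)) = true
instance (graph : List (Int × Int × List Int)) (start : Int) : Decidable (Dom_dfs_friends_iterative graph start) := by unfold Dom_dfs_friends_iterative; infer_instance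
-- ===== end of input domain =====

-- B replaces A's explicit flat stack loop with a recursive DFS (subtree sums returned up the
-- call chain, shared visited set, neighbors in reverse order); objective: alternative (not faster).

-- ===== PORT A =====
-- dict lookup, first match (exact: a Python dict has unique keys); none = KeyError
def pvLookup (graph : List (Int × Int × List Int)) (node : Int) : Option (Int × List Int) :=
  (graph.find? (fun e => e.1 == node)).map (·.2)

-- fuel unit: strictly larger than any neighbor list of the graph (totality device only)
def pvK (graph : List (Int × Int × List Int)) : Nat :=
  (graph.map (fun e => e.2.2.length)).sum + 1

-- the 'while stack:' loop of A: pop from the end, skip visited, add value, push neighbors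
def dfsLoopA (g : List (Int × Int × List Int)) :
    Nat → List Int → PySem.Set Int → Int → List Int × Int
  | 0, _, path, sum => (path, sum)            -- fuel exhausted (provably unreachable from the entry)
  | _ + 1, [], path, sum => (path, sum)
  | f + 1, x :: xs, path, sum =>
    let node := (x :: xs).getLast (by simp)   -- stack.pop()
    let rest := (x :: xs).dropLast
    if PySem.Set.contains path node then dfsLoopA g f rest path sum
    else
      match pvLookup g node with
      | none => (path, sum)                   -- Python raises KeyError here; excluded by Pre_
      | some (v, ns) => dfsLoopA g f (rest ++ ns) (PySem.Set.add path node) (sum + v)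

def dfs_friends_iterative (graph : List (Int × Int × List Int)) (start : Int) : List Int × Int :=
  dfsLoopA graph (graph.length * pvK graph + 1) [start] PySem.Set.empty 0

-- ===== PORT B =====
-- the recursive helper 'dfs' of B, with Python's KeyError modelled as Sum.inr (the exception
-- propagates: it carries the visited set and the values accumulated so far); fuel is a
-- totality device only, one unit per nesting level (provably sufficient from the entry).
-- dfsB = one call dfs(node); dfsListB = the 'for nb in reversed(neighbors)' loop of recursive calls.
mutual
def dfsB (g : List (Int × Int × List Int)) :
    Nat → Int → PySem.Set Int → (PySem.Set Int × Int) ⊕ (PySem.Set Int × Int)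
  | 0, _, p => Sum.inl (p, 0)                 -- fuel exhausted (provably unreachable from the entry)
  | f + 1, node, p =>
    if PySem.Set.contains p node then Sum.inl (p, 0)       -- if node in path: return 0
    else
      match pvLookup g node with
      | none => Sum.inr (p, 0)                -- KeyError raised here
      | some (v, ns) =>
        match dfsListB g f ns.reverse (PySem.Set.add p node) with
        | Sum.inl (p', t) => Sum.inl (p', v + t)
        | Sum.inr (p', t) => Sum.inr (p', v + t)
termination_by f => (f, 0)

def dfsListB (g : List (Int × Int × List Int)) :
    Nat → List Int → PySem.Set Int → (PySem.Set Int × Int) ⊕ (PySem.Set Int × Int)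
  | _, [], p => Sum.inl (p, 0)
  | f, n :: ns, p =>
    match dfsB g f n p with
    | Sum.inl (p1, t1) =>
      match dfsListB g f ns p1 with
      | Sum.inl (p2, t2) => Sum.inl (p2, t1 + t2)
      | Sum.inr (p2, t2) => Sum.inr (p2, t1 + t2)
    | Sum.inr r => Sum.inr r                  -- exception propagates
termination_by f ns => (f, ns.length + 1)
end

def dfs_friends_iterative_alt (graph : List (Int × Int × List Int)) (start : Int) : List Int × Int :=
  match dfsB graph (graph.length + 1) start PySem.Set.empty with
  | Sum.inl (p, t) => (p, t)
  | Sum.inr (p, t) => (p, t)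

-- ===== PRECONDITION & SPEC =====
-- bounded transitive closure of the neighbor relation (NOT the ports' traversal):
-- after graph.length + 1 rounds the set of nodes reachable from start is stable
def pvReachStep (graph : List (Int × Int × List Int)) (S : PySem.Set Int) : PySem.Set Int :=
  PySem.Set.update S ((S.map (fun n => ((pvLookup graph n).map (fun p => p.2)).getD [])).flatten)

def pvReachSet (graph : List (Int × Int × List Int)) (start : Int) : PySem.Set Int :=
  Nat.iterate (pvReachStep graph) (graph.length + 1) (PySem.Set.ofList [start])

-- A raises KeyError iff some node reachable from start is not a key of graph;
-- Pre_ admits exactly the inputs on which the Python A returns normally.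
def Pre_dfs_friends_iterative (graph : List (Int × Int × List Int)) (start : Int) : Prop :=
  ∀ n ∈ pvReachSet graph start, n ∈ graph.map (fun e => e.1)
instance (graph : List (Int × Int × List Int)) (start : Int) : Decidable (Pre_dfs_friends_iterative graph start) := by unfold Pre_dfs_friends_iterative; infer_instance

def pvWitness_dfs_friends_iterative : (List (Int × Int × List Int)) × Int :=
  ([(0, 5, [1, 2]), (1, 3, [0]), (2, -4, [2])], 0)

def Spec_dfs_friends_iterative (graph : List (Int × Int × List Int)) (start : Int) (out : List Int × Int) : Prop := out = dfs_friends_iterative_alt graph start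
instance (graph : List (Int × Int × List Int)) (start : Int) (out : List Int × Int) : Decidable (Spec_dfs_friends_iterative graph start out) := by unfold Spec_dfs_friends_iterative; infer_instance

-- ===== CLAIM (what is proved, stated in full; the proofs are below) =====
def Claim_equal_dfs_friends_iterative : Prop := ∀ (graph : List (Int × Int × List Int)) (start : Int), Dom_dfs_friends_iterative graph start → Pre_dfs_friends_iterative graph start → Spec_dfs_friends_iterative graph start (dfs_friends_iterative graph start)

-- ===== LEMMAS AND PROOFS =====

-- number of key occurrences not yet visited
def pvUnvisited (g : List (Int × Int × List Int)) (path : PySem.Set Int) : Nat :=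
  ((g.map (fun e => e.1)).filter (fun k => !(PySem.Set.contains path k))).length

def pvMeasure (g : List (Int × Int × List Int)) (stack : List Int) (path : PySem.Set Int) : Nat :=
  pvUnvisited g path * pvK g + stack.length

theorem pvNs_lt_K (g : List (Int × Int × List Int)) (node v : Int) (ns : List Int)
    (hl : pvLookup g node = some (v, ns)) : ns.length < pvK g := by
  unfold pvLookup at hl
  rcases Option.map_eq_some_iff.mp hl with ⟨e, he, hev⟩
  have hmem := List.mem_of_find?_eq_some he
  have : e.2.2.length ∈ g.map (fun e => e.2.2.length) := List.mem_map_of_mem hmem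
  have hle := List.single_le_sum (l := g.map (fun e => e.2.2.length)) (by intro x _; omega) _ this
  unfold pvK
  have : e.2.2 = ns := by rw [hev]
  rw [this] at hle
  omega

theorem pvKeyOfLookup (g : List (Int × Int × List Int)) (node v : Int) (ns : List Int)
    (hl : pvLookup g node = some (v, ns)) : node ∈ g.map (fun e => e.1) := by
  unfold pvLookup at hl
  rcases Option.map_eq_some_iff.mp hl with ⟨e, he, _⟩
  have hmem := List.mem_of_find?_eq_some he
  have hbeq := List.find?_some he
  have : e.1 = node := by simpa using hbeq
  exact this ▸ List.mem_map_of_mem hmem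

theorem pvContains_add (path : PySem.Set Int) (n k : Int) :
    PySem.Set.contains (PySem.Set.add path n) k = (PySem.Set.contains path k || k == n) := by
  simp [PySem.Set.add, PySem.Set.contains]
  by_cases h : n ∈ path
  · simp [h]
    by_cases hk : k = n
    · subst hk; simp [h]
    · simp [hk]
  · simp [h]
    by_cases hk : k = n <;> simp [hk]

theorem pvFilterLt (l : List Int) (q q' : Int → Bool)
    (himp : ∀ x, q' x = true → q x = true) (n : Int) (hn : n ∈ l)
    (hq : q n = true) (hq' : q' n = false) :
    (l.filter q').length < (l.filter q).length := by
  induction l with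
  | nil => cases hn
  | cons a l ih =>
    have hle : (l.filter q').length ≤ (l.filter q).length := by
      have := List.Sublist.length_le (List.monotone_filter_right l (p := q') (q := q) (by intro x hx; exact himp x hx))
      exact this
    rcases List.mem_cons.mp hn with rfl | hmem
    · simp [List.filter_cons, hq, hq']
      omega
    · have hlt := ih hmem
      by_cases ha' : q' a = true
      · simp [List.filter_cons, ha', himp a ha']
        omega
      · simp [List.filter_cons, eq_false_of_ne_true ha']
        by_cases ha : q a = true <;> simp [ha] <;> omega

theorem pvUnvisited_add_lt (g : List (Int × Int × List Int)) (path : PySem.Set Int)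
    (node : Int) (hk : node ∈ g.map (fun e => e.1))
    (hv : PySem.Set.contains path node = false) :
    pvUnvisited g (PySem.Set.add path node) < pvUnvisited g path := by
  unfold pvUnvisited
  refine pvFilterLt _ _ _ ?_ node hk ?_ ?_
  · intro x hx
    simp only [pvContains_add, Bool.not_eq_true', Bool.or_eq_false_iff] at hx
    simpa using hx.1
  · simpa using hv
  · simp [pvContains_add, hv]

theorem pvUnvisited_add_le (g : List (Int × Int × List Int)) (path : PySem.Set Int)
    (node : Int) :
    pvUnvisited g (PySem.Set.add path node) ≤ pvUnvisited g path := by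
  unfold pvUnvisited
  refine List.Sublist.length_le (List.monotone_filter_right _ ?_)
  intro x hx
  simp only [pvContains_add, Bool.not_eq_true', Bool.or_eq_false_iff] at hx
  simpa using hx.1

-- the common reference machine: A's flat stack loop, fuel-free (proof-only)
def pvRef (g : List (Int × Int × List Int)) (stack : List Int) (path : PySem.Set Int) (sum : Int) :
    List Int × Int :=
  match stack with
  | [] => (path, sum)
  | x :: xs =>
    if hv : PySem.Set.contains path ((x :: xs).getLast (by simp)) then
      pvRef g ((x :: xs).dropLast) path sum
    else
      match hl : pvLookup g ((x :: xs).getLast (by simp)) with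
      | none => (path, sum)
      | some (v, ns) =>
        pvRef g ((x :: xs).dropLast ++ ns)
          (PySem.Set.add path ((x :: xs).getLast (by simp))) (sum + v)
termination_by pvMeasure g stack path
decreasing_by
  · unfold pvMeasure
    simp [List.length_dropLast]
  · have hk := pvKeyOfLookup g _ _ _ hl
    have h1 := pvUnvisited_add_lt g path _ hk (eq_false_of_ne_true hv)
    have h2 := pvNs_lt_K g _ _ _ hl
    unfold pvMeasure
    simp only [List.length_append, List.length_dropLast, List.length_cons]
    have h3 : (pvUnvisited g (PySem.Set.add path ((x :: xs).getLast (by simp))) + 1) * pvK g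
        ≤ pvUnvisited g path * pvK g := Nat.mul_le_mul_right _ (by omega)
    rw [Nat.add_mul] at h3
    omega

theorem pvALoop_eq_ref (g : List (Int × Int × List Int)) :
    ∀ (f : Nat) (stack : List Int) (path : PySem.Set Int) (sum : Int),
      pvMeasure g stack path ≤ f → dfsLoopA g f stack path sum = pvRef g stack path sum := by
  intro f
  induction f with
  | zero =>
    intro stack path sum h
    unfold pvMeasure at h
    have : stack = [] := List.length_eq_zero_iff.mp (by omega)
    subst this
    simp [dfsLoopA, pvRef]
  | succ f ih =>
    intro stack path sum h
    match stack with
    | [] => simp [dfsLoopA, pvRef]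
    | x :: xs =>
      rw [pvRef]
      simp only [dfsLoopA]
      by_cases hv : PySem.Set.contains path ((x :: xs).getLast (by simp))
      · simp only [hv, if_true, dif_pos hv]
        apply ih
        unfold pvMeasure at h ⊢
        simp only [List.length_dropLast, List.length_cons] at h ⊢
        omega
      · simp only [hv, if_false, dif_neg hv]
        match hl : pvLookup g ((x :: xs).getLast (by simp)) with
        | none => rfl
        | some (v, ns) =>
          apply ih
          have hk := pvKeyOfLookup g _ _ _ hl
          have h1 := pvUnvisited_add_lt g path _ hk (eq_false_of_ne_true hv)
          have h2 := pvNs_lt_K g _ _ _ hl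
          unfold pvMeasure at h ⊢
          simp only [List.length_append, List.length_dropLast, List.length_cons] at h ⊢
          have h3 : (pvUnvisited g (PySem.Set.add path ((x :: xs).getLast (by simp))) + 1) * pvK g
              ≤ pvUnvisited g path * pvK g := Nat.mul_le_mul_right _ (by omega)
          rw [Nat.add_mul] at h3
          omega

theorem pvConcatCons {a : Type} (d : List a) (x : a) : ∃ z zs, d ++ [x] = z :: zs := by
  cases d <;> exact ⟨_, _, rfl⟩

theorem pvGetLast_concat {a : Type} (d : List a) (x z : a) (zs : List a)
    (hE : d ++ [x] = z :: zs) : (z :: zs).getLast (by simp) = x := by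
  have h1 : (z :: zs).getLast? = some x := by rw [← hE]; simp
  rwa [List.getLast?_eq_some_getLast (by simp), Option.some_inj] at h1

theorem pvDropLast_concat {a : Type} (d : List a) (x z : a) (zs : List a)
    (hE : d ++ [x] = z :: zs) : (z :: zs).dropLast = d := by
  rw [← hE]; exact List.dropLast_concat ..

-- unfold pvRef at a stack presented as d ++ [n]
theorem pvRef_concat (g : List (Int × Int × List Int)) (d : List Int) (n : Int)
    (p : PySem.Set Int) (s : Int) :
    pvRef g (d ++ [n]) p s =
      if PySem.Set.contains p n then pvRef g d p s
      else
        match pvLookup g n with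
        | none => (p, s)
        | some (v, ns) => pvRef g (d ++ ns) (PySem.Set.add p n) (s + v) := by
  obtain ⟨z, zs, hE⟩ := pvConcatCons d n
  have hgl := pvGetLast_concat d n z zs hE
  rw [hE, pvRef]
  simp only [pvGetLast_concat d n z zs hE, pvDropLast_concat d n z zs hE]
  by_cases hc : PySem.Set.contains p n = true
  · have hm : n ∈ p := by simpa using hc
    simp [hm]
  · have hm : n ∉ p := by simpa using hc
    rw [dif_neg (by simpa using hm), if_neg (by simpa using hm)]
    split <;> rename_i heq <;> rw [hgl] at heq <;> simp [heq]

-- the simultaneous correspondence: a recursive call dfs(node) (resp. its loop of recursive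
-- calls over a neighbor list) acts on the reference machine exactly like pushing node
-- (resp. the reversed list) onto the stack; fuel is sufficient while unvisited count < fuel
theorem pvB_ref (g : List (Int × Int × List Int)) :
    ∀ f : Nat,
      (∀ (node : Int) (p : PySem.Set Int), pvUnvisited g p < f →
        (∀ p' t, dfsB g f node p = Sum.inl (p', t) →
            (∀ d s, pvRef g (d ++ [node]) p s = pvRef g d p' (s + t))
              ∧ pvUnvisited g p' ≤ pvUnvisited g p)
        ∧ (∀ p' t, dfsB g f node p = Sum.inr (p', t) →
            ∀ d s, pvRef g (d ++ [node]) p s = (p', s + t)))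
      ∧
      (∀ (ns : List Int) (p : PySem.Set Int), pvUnvisited g p < f →
        (∀ p' t, dfsListB g f ns p = Sum.inl (p', t) →
            (∀ d s, pvRef g (d ++ ns.reverse) p s = pvRef g d p' (s + t))
              ∧ pvUnvisited g p' ≤ pvUnvisited g p)
        ∧ (∀ p' t, dfsListB g f ns p = Sum.inr (p', t) →
            ∀ d s, pvRef g (d ++ ns.reverse) p s = (p', s + t))) := by
  intro f
  induction f with
  | zero =>
    exact ⟨fun node p h => absurd h (by omega), fun ns p h => absurd h (by omega)⟩
  | succ f ih =>
    have hB : ∀ (node : Int) (p : PySem.Set Int), pvUnvisited g p < f + 1 →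
        (∀ p' t, dfsB g (f + 1) node p = Sum.inl (p', t) →
            (∀ d s, pvRef g (d ++ [node]) p s = pvRef g d p' (s + t))
              ∧ pvUnvisited g p' ≤ pvUnvisited g p)
        ∧ (∀ p' t, dfsB g (f + 1) node p = Sum.inr (p', t) →
            ∀ d s, pvRef g (d ++ [node]) p s = (p', s + t)) := by
      intro node p h
      have hstep : ∀ (res : (PySem.Set Int × Int) ⊕ (PySem.Set Int × Int)),
          dfsB g (f + 1) node p = res →
          (∀ p' t, res = Sum.inl (p', t) →
              (∀ d s, pvRef g (d ++ [node]) p s = pvRef g d p' (s + t))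
                ∧ pvUnvisited g p' ≤ pvUnvisited g p)
          ∧ (∀ p' t, res = Sum.inr (p', t) →
              ∀ d s, pvRef g (d ++ [node]) p s = (p', s + t)) := by
        intro res hres
        rw [dfsB] at hres
        by_cases hv : PySem.Set.contains p node = true
        · rw [if_pos hv] at hres
          subst hres
          constructor
          · intro p' t heq
            simp only [Sum.inl.injEq, Prod.mk.injEq] at heq
            obtain ⟨rfl, rfl⟩ := heq
            refine ⟨fun d s => ?_, le_refl _⟩
            rw [pvRef_concat, if_pos hv, add_zero]
          · intro p' t heq
            simp at heq
        · rw [if_neg hv] at hres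
          obtain ⟨o, ho⟩ : ∃ o, pvLookup g node = o := ⟨_, rfl⟩
          rw [ho] at hres
          cases o with
          | none =>
            replace hres : Sum.inr (p, (0 : Int)) = res := hres
            subst hres
            constructor
            · intro p' t heq; simp at heq
            · intro p' t heq
              simp only [Sum.inr.injEq, Prod.mk.injEq] at heq
              obtain ⟨rfl, rfl⟩ := heq
              intro d s
              rw [pvRef_concat, if_neg hv, ho, add_zero]
          | some pr =>
            obtain ⟨v, ns⟩ := pr
            have hk := pvKeyOfLookup g _ _ _ ho
            have hlt := pvUnvisited_add_lt g p node hk (eq_false_of_ne_true hv)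
            have hcond : pvUnvisited g (PySem.Set.add p node) < f := by omega
            have hle := pvUnvisited_add_le g p node
            replace hres :
                (match dfsListB g f ns.reverse (PySem.Set.add p node) with
                 | Sum.inl (p', t) => Sum.inl (p', v + t)
                 | Sum.inr (p', t) => Sum.inr (p', v + t)) = res := hres
            obtain ⟨r, hr⟩ : ∃ r, dfsListB g f ns.reverse (PySem.Set.add p node) = r :=
              ⟨_, rfl⟩
            rw [hr] at hres
            cases r with
            | inl pt =>
              obtain ⟨p1, t1⟩ := pt
              replace hres : Sum.inl (p1, v + t1) = res := hres
              subst hres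
              constructor
              · intro p' t heq
                simp only [Sum.inl.injEq, Prod.mk.injEq] at heq
                obtain ⟨rfl, rfl⟩ := heq
                obtain ⟨href, hmono⟩ :=
                  ((ih.2 ns.reverse (PySem.Set.add p node) hcond).1) p1 t1 hr
                refine ⟨fun d s => ?_, le_trans hmono hle⟩
                rw [pvRef_concat, if_neg hv, ho]
                show pvRef g (d ++ ns) (PySem.Set.add p node) (s + v) = _
                have h1 := href d (s + v)
                rw [List.reverse_reverse] at h1
                rw [h1]
                ring_nf
              · intro p' t heq; simp at heq
            | inr pt =>
              obtain ⟨p1, t1⟩ := pt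
              replace hres : Sum.inr (p1, v + t1) = res := hres
              subst hres
              constructor
              · intro p' t heq; simp at heq
              · intro p' t heq
                simp only [Sum.inr.injEq, Prod.mk.injEq] at heq
                obtain ⟨rfl, rfl⟩ := heq
                have href := ((ih.2 ns.reverse (PySem.Set.add p node) hcond).2) p1 t1 hr
                intro d s
                rw [pvRef_concat, if_neg hv, ho]
                show pvRef g (d ++ ns) (PySem.Set.add p node) (s + v) = _
                have h1 := href d (s + v)
                rw [List.reverse_reverse] at h1
                rw [h1]
                ring_nf
      exact hstep _ rfl
    refine ⟨hB, ?_⟩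
    intro ns
    induction ns with
    | nil =>
      intro p h
      constructor
      · intro p' t heq
        rw [dfsListB] at heq
        simp only [Sum.inl.injEq, Prod.mk.injEq] at heq
        obtain ⟨rfl, rfl⟩ := heq
        exact ⟨fun d s => by simp, le_refl _⟩
      · intro p' t heq
        rw [dfsListB] at heq
        simp at heq
    | cons n rest ihl =>
      intro p h
      have e1 : ∀ d : List Int, d ++ (n :: rest).reverse = (d ++ rest.reverse) ++ [n] := by
        intro d; simp
      have hstep : ∀ (res : (PySem.Set Int × Int) ⊕ (PySem.Set Int × Int)),
          dfsListB g (f + 1) (n :: rest) p = res →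
          (∀ p' t, res = Sum.inl (p', t) →
              (∀ d s, pvRef g (d ++ (n :: rest).reverse) p s = pvRef g d p' (s + t))
                ∧ pvUnvisited g p' ≤ pvUnvisited g p)
          ∧ (∀ p' t, res = Sum.inr (p', t) →
              ∀ d s, pvRef g (d ++ (n :: rest).reverse) p s = (p', s + t)) := by
        intro res hres
        rw [dfsListB] at hres
        obtain ⟨r1, hr1⟩ : ∃ r, dfsB g (f + 1) n p = r := ⟨_, rfl⟩
        rw [hr1] at hres
        cases r1 with
        | inl pt =>
          obtain ⟨p1, t1⟩ := pt
          obtain ⟨href1, hmono1⟩ := (hB n p h).1 p1 t1 hr1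
          replace hres :
              (match dfsListB g (f + 1) rest p1 with
               | Sum.inl (p2, t2) => Sum.inl (p2, t1 + t2)
               | Sum.inr (p2, t2) => Sum.inr (p2, t1 + t2)) = res := hres
          obtain ⟨r2, hr2⟩ : ∃ r, dfsListB g (f + 1) rest p1 = r := ⟨_, rfl⟩
          rw [hr2] at hres
          cases r2 with
          | inl pt2 =>
            obtain ⟨p2, t2⟩ := pt2
            replace hres : Sum.inl (p2, t1 + t2) = res := hres
            subst hres
            constructor
            · intro p' t heq
              simp only [Sum.inl.injEq, Prod.mk.injEq] at heq
              obtain ⟨rfl, rfl⟩ := heq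
              obtain ⟨href2, hmono2⟩ := (ihl p1 (by omega)).1 p2 t2 hr2
              refine ⟨fun d s => ?_, le_trans hmono2 hmono1⟩
              rw [e1 d, href1 (d ++ rest.reverse) s, href2 d (s + t1)]
              ring_nf
            · intro p' t heq; simp at heq
          | inr pt2 =>
            obtain ⟨p2, t2⟩ := pt2
            replace hres : Sum.inr (p2, t1 + t2) = res := hres
            subst hres
            constructor
            · intro p' t heq; simp at heq
            · intro p' t heq
              simp only [Sum.inr.injEq, Prod.mk.injEq] at heq
              obtain ⟨rfl, rfl⟩ := heq
              have href2 := (ihl p1 (by omega)).2 p2 t2 hr2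
              intro d s
              rw [e1 d, href1 (d ++ rest.reverse) s, href2 d (s + t1)]
              ring_nf
        | inr pt =>
          obtain ⟨p1, t1⟩ := pt
          replace hres : Sum.inr (p1, t1) = res := hres
          subst hres
          constructor
          · intro p' t heq; simp at heq
          · intro p' t heq
            simp only [Sum.inr.injEq, Prod.mk.injEq] at heq
            obtain ⟨rfl, rfl⟩ := heq
            have href1 := (hB n p h).2 p1 t1 hr1
            intro d s
            rw [e1 d, href1 (d ++ rest.reverse) s]
      exact hstep _ rfl

theorem pvUnvisited_empty (g : List (Int × Int × List Int)) :
    pvUnvisited g ([] : PySem.Set Int) = g.length := by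
  unfold pvUnvisited
  have : ∀ k : Int, PySem.Set.contains PySem.Set.empty k = false := by
    intro k; simp [PySem.Set.contains, PySem.Set.empty]
  simp [this]

theorem pvRef_nil (g : List (Int × Int × List Int)) (p : PySem.Set Int) (s : Int) :
    pvRef g [] p s = (p, s) := by
  rw [pvRef]

-- ===== VERDICT (by name: the statement is the Claim_ definition above) =====
theorem dfs_friends_iterative_spec : Claim_equal_dfs_friends_iterative := by
  intro graph start _hdom _hpre
  unfold Spec_dfs_friends_iterative dfs_friends_iterative dfs_friends_iterative_alt
  rw [pvALoop_eq_ref]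
  · have hcond : pvUnvisited graph (PySem.Set.empty : PySem.Set Int) < graph.length + 1 := by
      have := pvUnvisited_empty graph
      simp [PySem.Set.empty] at this ⊢
      omega
    have h := (pvB_ref graph (graph.length + 1)).1 start PySem.Set.empty hcond
    cases hres : dfsB graph (graph.length + 1) start PySem.Set.empty with
    | inl pt =>
      obtain ⟨p, t⟩ := pt
      have h1 := (h.1 p t hres).1 [] 0
      simp only [List.nil_append] at h1
      rw [h1, pvRef_nil, zero_add]
    | inr pt =>
      obtain ⟨p, t⟩ := pt
      have h1 := h.2 p t hres [] 0
      simp only [List.nil_append] at h1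
      rw [h1, zero_add]
  · unfold pvMeasure
    simp [pvUnvisited_empty]
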